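-- pv_equiv track=rewrite | github.com/KamalS-netizen/ai-transition | day8_structured_ai_output.py | build_open_queue_counts
-- ===== SOURCE A (Python) =====
-- def build_open_queue_counts(results):
--     open_queue_counts = {
--         "high": 0,
--         "medium": 0
--     }
--
--     for ticket in results:
--         priority = ticket["priority"]
--
--         if priority in open_queue_counts:
--             open_queue_counts[priority] += 1
--
--     return open_queue_counts
-- ===== SOURCE B (Python) =====
-- def build_open_queue_counts(results):
--     # Divide and conquer: split the list in half, tally each half into a
--     # (high, medium) pair recursively, merge partial counts by addition.
--     def tally(chunk):
--         if not chunk: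
--             return (0, 0)
--         if len(chunk) == 1:
--             p = chunk[0]["priority"]
--             return (1 if p == "high" else 0, 1 if p == "medium" else 0)
--         mid = len(chunk) // 2
--         h1, m1 = tally(chunk[:mid])
--         h2, m2 = tally(chunk[mid:])
--         return (h1 + h2, m1 + m2)
--
--     high, medium = tally(results)
--     return {"high": high, "medium": medium}
-- ===== Notes on version B (the rewrite author's own statement) =====
-- stated objective: alternative
-- what changed: Replaces A's single left-to-right pass that mutates a membership-guarded accumulator dict by a divide-and-conquer recursion: the list is split in half, each half is tallied into a (high, medium) pair, and partial counts are merged by addition; the dict is assembled only once at the end.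
import Mathlib
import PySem

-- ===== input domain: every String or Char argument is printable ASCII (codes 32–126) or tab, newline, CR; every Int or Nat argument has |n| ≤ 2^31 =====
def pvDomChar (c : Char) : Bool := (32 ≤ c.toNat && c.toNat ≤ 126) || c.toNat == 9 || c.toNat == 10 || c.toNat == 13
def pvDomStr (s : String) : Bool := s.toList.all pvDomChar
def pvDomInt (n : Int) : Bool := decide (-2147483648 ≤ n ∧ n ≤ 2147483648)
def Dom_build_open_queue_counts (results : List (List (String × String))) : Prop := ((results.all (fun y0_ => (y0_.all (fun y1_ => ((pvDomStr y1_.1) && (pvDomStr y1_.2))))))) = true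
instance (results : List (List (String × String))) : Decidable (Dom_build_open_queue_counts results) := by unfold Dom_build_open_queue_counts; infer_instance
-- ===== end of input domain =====

-- B replaces A's single guarded-increment pass by a divide-and-conquer tally merging (high, medium) pairs.

-- ===== PORT A =====
-- Accumulator dict kept as an association list with the two fixed keys; ticket["priority"]
-- is a first-match lookup (List.lookup); the `none` branch is a KeyError in Python,
-- excluded by Pre_ (the value there is unclaimed).
def pvStepA (d : List (String × Int)) (ticket : List (String × String)) : List (String × Int) :=
  match ticket.lookup "priority" with
  | none => d
  | some p =>
    if (d.lookup p).isSome then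
      d.map (fun kv => if kv.1 == p then (kv.1, kv.2 + 1) else kv)
    else d

def build_open_queue_counts (results : List (List (String × String))) : List (String × Int) :=
  results.foldl pvStepA [("high", 0), ("medium", 0)]

-- ===== PORT B =====
-- tally(chunk): divide and conquer on the list; chunk[:mid]/chunk[mid:] are take/drop.
-- chunk[0]["priority"] missing is a KeyError in Python, excluded by Pre_.
def pvTally (chunk : List (List (String × String))) : Int × Int :=
  match chunk with
  | [] => (0, 0)
  | [t] =>
    let p := (t.lookup "priority").getD ""
    ((if p == "high" then 1 else 0), (if p == "medium" then 1 else 0))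
  | a :: b :: rest =>
    let mid := (a :: b :: rest).length / 2
    let r1 := pvTally ((a :: b :: rest).take mid)
    let r2 := pvTally ((a :: b :: rest).drop mid)
    (r1.1 + r2.1, r1.2 + r2.2)
termination_by chunk.length
decreasing_by
  · simp [List.length_take]; omega
  · simp [List.length_drop]; omega

def build_open_queue_counts_alt (results : List (List (String × String))) : List (String × Int) :=
  let hm := pvTally results
  [("high", hm.1), ("medium", hm.2)]

-- ===== PRECONDITION & SPEC =====
-- Pre_ excludes exactly the inputs where some ticket has no "priority" key, on which
-- Python A (and B) raise KeyError.
def Pre_build_open_queue_counts (results : List (List (String × String))) : Prop :=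
  (results.all (fun ticket => (ticket.lookup "priority").isSome)) = true
instance (results : List (List (String × String))) : Decidable (Pre_build_open_queue_counts results) := by unfold Pre_build_open_queue_counts; infer_instance
def pvWitness_build_open_queue_counts : (List (List (String × String))) :=
  [[("priority", "high")], [("priority", "low")], [("priority", "medium")]]

def Spec_build_open_queue_counts (results : List (List (String × String))) (out : List (String × Int)) : Prop := out = build_open_queue_counts_alt results
instance (results : List (List (String × String))) (out : List (String × Int)) : Decidable (Spec_build_open_queue_counts results out) := by unfold Spec_build_open_queue_counts; infer_instance

-- ===== CLAIM (what is proved, stated in full; the proofs are below) =====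
def Claim_equal_build_open_queue_counts : Prop := ∀ (results : List (List (String × String))), Dom_build_open_queue_counts results → Pre_build_open_queue_counts results → Spec_build_open_queue_counts results (build_open_queue_counts results)

-- ===== LEMMAS AND PROOFS =====

-- the common reference value: number of "high" / "medium" priorities in l
def pvCountP (p : String) (l : List (List (String × String))) : Int :=
  ((l.map (fun t => (t.lookup "priority").getD "")).count p : Int)

theorem pvCountP_append (p : String) (l₁ l₂ : List (List (String × String))) :
    pvCountP p (l₁ ++ l₂) = pvCountP p l₁ + pvCountP p l₂ := by
  simp [pvCountP]

-- B's divide-and-conquer tally computes the two counts.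
theorem tally_eq (l : List (List (String × String))) :
    pvTally l = (pvCountP "high" l, pvCountP "medium" l) := by
  fun_induction pvTally l with
  | case1 => simp [pvCountP]
  | case2 t p =>
    simp only [pvCountP, List.map_cons, List.map_nil, List.count_cons, List.count_nil]
    by_cases h1 : p = "high" <;> by_cases h2 : p = "medium" <;>
      simp_all [p]
  | case3 a b rest mid r1 r2 ih2 ih1 =>
    have hsplit := List.take_append_drop mid (a :: b :: rest)
    have hh := pvCountP_append "high" ((a :: b :: rest).take mid) ((a :: b :: rest).drop mid)
    have hm := pvCountP_append "medium" ((a :: b :: rest).take mid) ((a :: b :: rest).drop mid)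
    rw [hsplit] at hh hm
    simp only [r1, r2, ih1, ih2, ← hh, ← hm]

-- Loop invariant for A: folding A's step over l starting from (h, m) adds the counts.
theorem fold_counts (l : List (List (String × String))) (h m : Int)
    (hp : ∀ t ∈ l, (t.lookup "priority").isSome = true) :
    l.foldl pvStepA [("high", h), ("medium", m)]
    = [("high", h + pvCountP "high" l), ("medium", m + pvCountP "medium" l)] := by
  induction l generalizing h m with
  | nil => simp [pvCountP]
  | cons t rest ih =>
    obtain ⟨p, hpv⟩ := Option.isSome_iff_exists.mp (hp t (by simp))
    have hrest : ∀ t ∈ rest, (t.lookup "priority").isSome = true := fun t ht => hp t (by simp [ht])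
    rw [List.foldl_cons]
    by_cases h1 : p = "high"
    · subst h1
      have hstep : pvStepA [("high", h), ("medium", m)] t = [("high", h + 1), ("medium", m)] := by
        simp [pvStepA, hpv]
      rw [hstep, ih _ _ hrest]
      simp [pvCountP, hpv]
      ring
    · by_cases h2 : p = "medium"
      · subst h2
        have hstep : pvStepA [("high", h), ("medium", m)] t = [("high", h), ("medium", m + 1)] := by
          simp [pvStepA, hpv, List.lookup]
        rw [hstep, ih _ _ hrest]
        simp [pvCountP, hpv]
        ring
      · have e1 : (p == "high") = false := by simp [h1]
        have e2 : (p == "medium") = false := by simp [h2]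
        have hstep : pvStepA [("high", h), ("medium", m)] t = [("high", h), ("medium", m)] := by
          simp [pvStepA, hpv, List.lookup, e1, e2]
        rw [hstep, ih _ _ hrest]
        simp [pvCountP, hpv, List.count_cons]
        exact ⟨h1, h2⟩

-- ===== VERDICT (by name: the statement is the Claim_ definition above) =====
theorem build_open_queue_counts_spec : Claim_equal_build_open_queue_counts := by
  intro results _ hpre
  have hp : ∀ t ∈ results, (t.lookup "priority").isSome = true := by
    simpa [Pre_build_open_queue_counts, List.all_eq_true] using hpre
  show build_open_queue_counts results = build_open_queue_counts_alt results
  simp [build_open_queue_counts, build_open_queue_counts_alt,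
        fold_counts results 0 0 hp, tally_eq]
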